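-- pv_equiv track=rewrite | github.com/MusicalGestalt/MusicGeneration | rhythm/interval_sequences/__init__.py | __get_focus_weights
-- ===== SOURCE A (Python) =====
-- def __get_focus_weights(n):
--     weights = [0] * n;
--     k = n
--     while k > 1:
--         divisor = k
--         for i in range(2, k):
--             if (k % i) == 0:
--                 divisor = i
--                 break
--         assert divisor > 1
--         assert (k % divisor) == 0
--         k = int(k / divisor)
--         for i in range(0, n, k):
--             weights[i] += 1
--     return weights
-- ===== SOURCE B (Python) =====
-- def __get_focus_weights(n):
--     # Build the chain of cumulative quotients once (ascending trial division,
--     # the divisor pointer p never restarts), then count divisors per index.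
--     ks = []
--     m = n
--     p = 2
--     while m > 1:
--         while m % p != 0:
--             p += 1
--         m //= p
--         ks.append(m)
--     return [sum(1 for k in ks if i % k == 0) for i in range(n)]
-- ===== Notes on version B (the rewrite author's own statement) =====
-- stated objective: alternative
-- what changed: A repeatedly rescans from the lowest candidate for the smallest factor and mutates the weights array with one stepped increment pass per factor; B factorizes once with a non-restarting divisor pointer to build the chain of cumulative quotients and then computes each weight directly as the count of chain values dividing its index.
import Mathlib
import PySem

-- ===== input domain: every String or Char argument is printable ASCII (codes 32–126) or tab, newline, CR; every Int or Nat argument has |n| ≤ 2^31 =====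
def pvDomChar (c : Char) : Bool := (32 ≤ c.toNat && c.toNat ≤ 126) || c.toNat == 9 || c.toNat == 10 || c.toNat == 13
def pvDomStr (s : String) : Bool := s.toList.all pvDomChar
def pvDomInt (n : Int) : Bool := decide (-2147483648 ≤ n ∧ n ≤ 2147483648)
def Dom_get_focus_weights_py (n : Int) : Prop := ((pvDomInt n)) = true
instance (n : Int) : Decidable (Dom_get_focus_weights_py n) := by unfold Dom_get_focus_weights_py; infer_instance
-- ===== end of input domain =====

-- B builds the quotient chain once with a non-restarting divisor pointer and fills each
-- weight by counting chain divisors of its index, instead of A's per-factor rescan from the lowest candidate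
-- plus one mutating increment pass over the array per factor (objective: alternative).

-- ===== PORT A =====
-- 'for i in range(2, k): if (k % i) == 0: divisor = i; break'  (else clause: divisor stays k)
def pvFindDivA (k : Int) : List Int → Int
  | [] => k
  | i :: t => if PySem.Int.mod k i == 0 then i else pvFindDivA k t

-- 'for i in range(0, n, k): weights[i] += 1'  (every i is in range 0 ≤ i < n = len(weights),
-- so the total get/set forms are exact here)
def pvIncPassA (n k : Int) (w : List Int) : List Int :=
  (PySem.List.pyRange 0 n k).foldl
    (fun w i => PySem.List.pySetD w i (PySem.List.pyGetD w i 0 + 1)) w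

-- the 'while k > 1' loop; fuel n.toNat (the loop runs once per prime factor of n, at most
-- log2 n ≤ n.toNat times, so the fuel never runs out).  'int(k / divisor)' is exact integer
-- division here (divisor ∣ k, both positive and ≤ 2^31, so the float quotient is exact):
-- ported as floordiv.
def pvLoopA : Nat → Int → Int → List Int → List Int
  | 0, _, _, w => w
  | f + 1, n, k, w =>
    if 1 < k then
      let divisor := pvFindDivA k (PySem.List.pyRange 2 k 1)
      let k' := PySem.Int.floordiv k divisor
      pvLoopA f n k' (pvIncPassA n k' w)
    else w

def get_focus_weights_py (n : Int) : List Int :=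
  pvLoopA n.toNat n n (List.replicate n.toNat 0)

-- ===== PORT B =====
-- 'while m % p != 0: p += 1'; fuel m.toNat (p starts ≥ 2, never passes m since m % m == 0)
def pvNextFacB : Nat → Int → Int → Int
  | 0, _, p => p
  | f + 1, m, p => if PySem.Int.mod m p == 0 then p else pvNextFacB f m (p + 1)

-- B's 'while m > 1' loop collecting ks; fuel n.toNat as in A's port
def pvChainB : Nat → Int → Int → List Int
  | 0, _, _ => []
  | f + 1, m, p =>
    if 1 < m then
      let p' := pvNextFacB m.toNat m p
      let m' := PySem.Int.floordiv m p'
      m' :: pvChainB f m' p'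
    else []

def get_focus_weights_py_alt (n : Int) : List Int :=
  let ks := pvChainB n.toNat n 2
  (PySem.List.pyRange 0 n 1).map
    (fun i => ks.foldl (fun acc k => if PySem.Int.mod i k == 0 then acc + 1 else acc) (0 : Int))

-- ===== PRECONDITION & SPEC =====
def Spec_get_focus_weights_py (n : Int) (out : List Int) : Prop := out = get_focus_weights_py_alt n
instance (n : Int) (out : List Int) : Decidable (Spec_get_focus_weights_py n out) := by unfold Spec_get_focus_weights_py; infer_instance

-- ===== CLAIM (what is proved, stated in full; the proofs are below) =====
def Claim_equal_get_focus_weights_py : Prop := ∀ (n : Int), Dom_get_focus_weights_py n → Spec_get_focus_weights_py n (get_focus_weights_py n)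

-- ===== LEMMAS AND PROOFS =====

-- pvNextFacB finds the least divisor of m that is ≥ p (given enough fuel and p ≤ m)
theorem pvNextFacB_spec (f : Nat) : ∀ (m p : Int), 0 < p → p ≤ m → (m - p).toNat ≤ f →
    p ≤ pvNextFacB f m p ∧ pvNextFacB f m p ∣ m ∧
      ∀ r, p ≤ r → r < pvNextFacB f m p → ¬ r ∣ m := by
  induction f with
  | zero =>
    intro m p hp hpm hf
    have : m = p := by omega
    subst this
    have e : pvNextFacB 0 m m = m := rfl
    rw [e]
    exact ⟨le_refl m, dvd_refl m, fun r h1 h2 => absurd h2 (by omega)⟩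
  | succ f ih =>
    intro m p hp hpm hf
    by_cases h : PySem.Int.mod m p = 0
    · have hd : p ∣ m := (PySem.Int.mod_eq_zero_iff_dvd m p).mp h
      simp [pvNextFacB, h]
      exact ⟨hd, fun r h1 h2 => absurd h1 (by omega)⟩
    · have hnd : ¬ p ∣ m := fun hd => h ((PySem.Int.mod_eq_zero_iff_dvd m p).mpr hd)
      have hlt : p < m := by
        rcases lt_or_eq_of_le hpm with h' | h'
        · exact h'
        · exact absurd (h' ▸ dvd_refl p) hnd
      have hrec := ih m (p + 1) (by omega) (by omega) (by omega)
      have hstep : pvNextFacB (f + 1) m p = pvNextFacB f m (p + 1) := by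
        simp [pvNextFacB, show (PySem.Int.mod m p == 0) = false by simpa using h]
      rw [hstep]
      refine ⟨by omega, hrec.2.1, ?_⟩
      intro r h1 h2
      rcases eq_or_lt_of_le h1 with h' | h'
      · exact h' ▸ hnd
      · exact hrec.2.2 r (by omega) h2

-- pvFindDivA on range(a, k) finds the least divisor of k that is ≥ a (else k itself)
theorem pvFindDivA_spec (k : Int) (hk : 2 ≤ k) : ∀ (a : Int), 2 ≤ a → a ≤ k →
    a ≤ pvFindDivA k (PySem.List.pyRange a k 1) ∧
      pvFindDivA k (PySem.List.pyRange a k 1) ∣ k ∧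
      ∀ r, a ≤ r → r < pvFindDivA k (PySem.List.pyRange a k 1) → ¬ r ∣ k := by
  intro a
  induction hn : (k - a).toNat generalizing a with
  | zero =>
    intro ha hak
    have : a = k := by omega
    subst this
    rw [PySem.List.pyRange_one_eq_nil (le_refl a)]
    simp [pvFindDivA]
    exact fun r h1 h2 => absurd h1 (by omega)
  | succ m ih =>
    intro ha hak
    have hlt : a < k := by omega
    by_cases h : PySem.Int.mod k a = 0
    · have hd : a ∣ k := (PySem.Int.mod_eq_zero_iff_dvd k a).mp h
      rw [PySem.List.pyRange_one_cons hlt]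
      simp [pvFindDivA, h]
      exact ⟨hd, fun r h1 h2 => absurd h1 (by omega)⟩
    · have hnd : ¬ a ∣ k := fun hd => h ((PySem.Int.mod_eq_zero_iff_dvd k a).mpr hd)
      have hstep : pvFindDivA k (PySem.List.pyRange a k 1) = pvFindDivA k (PySem.List.pyRange (a + 1) k 1) := by
        rw [PySem.List.pyRange_one_cons hlt]
        simp [pvFindDivA, show (PySem.Int.mod k a == 0) = false by simpa using h]
      rw [hstep]
      have hrec := ih (a + 1) (by omega) (by omega) (by omega)
      refine ⟨by omega, hrec.2.1, ?_⟩
      intro r h1 h2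
      rcases eq_or_lt_of_le h1 with h' | h'
      · exact h' ▸ hnd
      · exact hrec.2.2 r (by omega) h2

-- under the loop invariant (no divisor of m below p) the two divisor searches agree
theorem pvDiv_eq (m p : Int) (f : Nat) (hp : 2 ≤ p) (hpm : p ≤ m)
    (hinv : ∀ r, 2 ≤ r → r < p → ¬ r ∣ m) (hf : (m - p).toNat ≤ f) :
    pvFindDivA m (PySem.List.pyRange 2 m 1) = pvNextFacB f m p := by
  have hm : 2 ≤ m := by omega
  obtain ⟨hA1, hA2, hA3⟩ := pvFindDivA_spec m hm 2 (le_refl 2) hm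
  obtain ⟨hB1, hB2, hB3⟩ := pvNextFacB_spec f m p (by omega) hpm hf
  set d := pvFindDivA m (PySem.List.pyRange 2 m 1)
  set q := pvNextFacB f m p
  rcases lt_trichotomy d q with h | h | h
  · by_cases hdp : d < p
    · exact absurd hA2 (hinv d hA1 hdp)
    · exact absurd hA2 (hB3 d (by omega) h)
  · exact h
  · exact absurd hB2 (hA3 q (by omega) h)

-- one step of the loop: facts about q = least divisor and m' = m / q
theorem pvStep_facts (m p : Int) (hp : 2 ≤ p) (hm : 1 < m) (hpm : p ≤ m)
    (hinv : ∀ r, 2 ≤ r → r < p → ¬ r ∣ m) :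
    let q := pvNextFacB m.toNat m p
    let m' := PySem.Int.floordiv m q
    2 ≤ q ∧ q ∣ m ∧ q ≤ m ∧ 1 ≤ m' ∧ m' < m ∧ (1 < m' → q ≤ m') ∧
      (∀ r, 2 ≤ r → r < q → ¬ r ∣ m') := by
  intro q m'
  have hf : (m - p).toNat ≤ m.toNat := by omega
  obtain ⟨hB1, hB2, hB3⟩ := pvNextFacB_spec m.toNat m p (by omega) hpm hf
  have hq2 : 2 ≤ q := by omega
  have hqm : q ≤ m := Int.le_of_dvd (by omega) hB2
  have hfd : m' = m / q := PySem.Int.floordiv_eq_ediv_of_pos (by omega)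
  have hmul : m' * q = m := by rw [hfd]; exact Int.ediv_mul_cancel hB2
  have hm'1 : 1 ≤ m' := by nlinarith [hmul]
  have hm'm : m' < m := by nlinarith [hmul]
  have hm'dvd : m' ∣ m := ⟨q, by linarith [hmul, mul_comm m' q]⟩
  have hsmall : ∀ r, 2 ≤ r → r < q → ¬ r ∣ m := by
    intro r h1 h2 hd
    by_cases hrp : r < p
    · exact hinv r h1 hrp hd
    · exact hB3 r (by omega) h2 hd
  refine ⟨hq2, hB2, hqm, hm'1, hm'm, ?_, ?_⟩
  · intro h1
    by_contra h2
    exact hsmall m' (by omega) (by omega) hm'dvd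
  · intro r h1 h2 hd
    exact hsmall r h1 h2 (hd.trans hm'dvd)

-- A's while loop is the fold of A's increment pass over B's quotient chain
theorem pvLoop_eq (f : Nat) : ∀ (m p : Int) (w : List Int) (n : Int), 2 ≤ p →
    (1 < m → p ≤ m) → (∀ r, 2 ≤ r → r < p → ¬ r ∣ m) →
    pvLoopA f n m w = (pvChainB f m p).foldl (fun w kk => pvIncPassA n kk w) w := by
  induction f with
  | zero => intro m p w n _ _ _; rfl
  | succ f ih =>
    intro m p w n hp hpm hinv
    by_cases hm : 1 < m
    · obtain ⟨hq2, hqd, hqm, hm'1, hm'm, hm'q, hm'inv⟩ := pvStep_facts m p hp hm (hpm hm) hinv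
      have hdeq := pvDiv_eq m p m.toNat hp (hpm hm) hinv (by omega)
      simp only [pvLoopA, pvChainB, if_pos hm, hdeq, List.foldl_cons]
      exact ih (PySem.Int.floordiv m (pvNextFacB m.toNat m p)) (pvNextFacB m.toNat m p)
        (pvIncPassA n (PySem.Int.floordiv m (pvNextFacB m.toNat m p)) w) n hq2 hm'q hm'inv
    · simp [pvLoopA, pvChainB, if_neg hm]

-- every element of the chain is ≥ 1
theorem pvChain_pos (f : Nat) : ∀ (m p : Int), 2 ≤ p → (1 < m → p ≤ m) →
    (∀ r, 2 ≤ r → r < p → ¬ r ∣ m) → ∀ kk ∈ pvChainB f m p, 1 ≤ kk := by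
  induction f with
  | zero => intro m p _ _ _ kk h; simp [pvChainB] at h
  | succ f ih =>
    intro m p hp hpm hinv kk hmem
    by_cases hm : 1 < m
    · obtain ⟨hq2, hqd, hqm, hm'1, hm'm, hm'q, hm'inv⟩ := pvStep_facts m p hp hm (hpm hm) hinv
      simp only [pvChainB, if_pos hm, List.mem_cons] at hmem
      rcases hmem with h | h
      · omega
      · exact ih _ _ hq2 hm'q hm'inv kk h
    · simp [pvChainB, if_neg hm] at hmem

-- the set-increment fold preserves length
theorem pvFoldSet_len (l : List Int) : ∀ (w : List Int),
    (l.foldl (fun w j => PySem.List.pySetD w j (PySem.List.pyGetD w j 0 + 1)) w).length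
      = w.length := by
  induction l with
  | nil => intro w; rfl
  | cons j t ih => intro w; rw [List.foldl_cons, ih, PySem.List.length_pySetD]

-- the set-increment fold adds, at index i, the number of occurrences of i in the index list
theorem pvFoldSet_get (l : List Int) : ∀ (w : List Int),
    (∀ j ∈ l, 0 ≤ j ∧ j < (w.length : Int)) → ∀ i : Nat, i < w.length →
    PySem.List.pyGetD
        (l.foldl (fun w j => PySem.List.pySetD w j (PySem.List.pyGetD w j 0 + 1)) w)
        (i : Int) 0
      = PySem.List.pyGetD w (i : Int) 0 + (l.count (i : Int) : Int) := by
  induction l with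
  | nil => intro w _ i _; simp
  | cons j t ih =>
    intro w hin i hi
    obtain ⟨hj0, hjl⟩ := hin j (List.mem_cons_self ..)
    have hjn : j = ((j.toNat : Nat) : Int) := by omega
    have hjlt : j.toNat < w.length := by omega
    set w' := PySem.List.pySetD w j (PySem.List.pyGetD w j 0 + 1) with hw'
    have hlen' : w'.length = w.length := PySem.List.length_pySetD ..
    have hin' : ∀ x ∈ t, 0 ≤ x ∧ x < (w'.length : Int) := by
      intro x hx; rw [hlen']; exact hin x (List.mem_cons_of_mem _ hx)
    rw [List.foldl_cons, ← hw', ih w' hin' i (by omega)]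
    have hget : PySem.List.pyGetD w' (i : Int) 0
        = if i = j.toNat then PySem.List.pyGetD w j 0 + 1 else PySem.List.pyGetD w (i : Int) 0 := by
      rw [hw', hjn]
      exact PySem.List.pyGetD_pySetD_natCast w j.toNat i _ 0 hjlt
    rw [hget, List.count_cons]
    by_cases hij : i = j.toNat
    · have hji : (j == ((i : Nat) : Int)) = true := by simp; omega
      have hwe : PySem.List.pyGetD w j 0 = PySem.List.pyGetD w ((i : Nat) : Int) 0 := by
        congr 1; omega
      rw [if_pos hij, hji, hwe]
      push_cast
      simp
      omega
    · have hji : (j == ((i : Nat) : Int)) = false := by simp; omega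
      rw [if_neg hij, hji]
      push_cast
      simp

-- count of i in range(0, n, kk): one if kk divides i, else zero (for 0 ≤ i < n, kk ≥ 1)
theorem pvCount_range (n kk : Int) (hkk : 1 ≤ kk) (i : Nat) (hi : (i : Int) < n) :
    ((PySem.List.pyRange 0 n kk).count (i : Int) : Int)
      = if kk ∣ (i : Int) then 1 else 0 := by
  have hnd : (PySem.List.pyRange 0 n kk).Nodup := by
    rw [PySem.List.pyRange_of_pos 0 n (by omega)]
    refine List.Nodup.map ?_ (List.nodup_range)
    intro x y hxy
    simp only [zero_add] at hxy
    have : (x : Int) = y := by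
      have := mul_left_cancel₀ (show kk ≠ 0 by omega) hxy
      exact this
    exact_mod_cast this
  by_cases hmem : (i : Int) ∈ PySem.List.pyRange 0 n kk
  · have hd : kk ∣ (i : Int) := by
      have := (PySem.List.mem_pyRange_iff_of_pos (by omega : (0:Int) < kk) (i : Int)).mp hmem
      simpa using this.2.2
    rw [if_pos hd]
    exact_mod_cast List.count_eq_one_of_mem hnd hmem
  · have hnd2 : ¬ kk ∣ (i : Int) := by
      intro hd
      exact hmem ((PySem.List.mem_pyRange_iff_of_pos (by omega) (i : Int)).mpr
        ⟨by omega, by omega, by simpa using hd⟩)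
    rw [if_neg hnd2]
    simp [List.count_eq_zero_of_not_mem hmem]

-- one increment pass: length preserved and pointwise effect
theorem pvIncPassA_len (n kk : Int) (w : List Int) : (pvIncPassA n kk w).length = w.length :=
  pvFoldSet_len _ w

theorem pvIncPassA_get (n kk : Int) (w : List Int) (hkk : 1 ≤ kk)
    (hlen : (w.length : Int) = n) (i : Nat) (hi : i < w.length) :
    PySem.List.pyGetD (pvIncPassA n kk w) (i : Int) 0
      = PySem.List.pyGetD w (i : Int) 0 + (if kk ∣ (i : Int) then 1 else 0) := by
  have hin : ∀ j ∈ PySem.List.pyRange 0 n kk, 0 ≤ j ∧ j < (w.length : Int) := by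
    intro j hj
    have := (PySem.List.mem_pyRange_iff_of_pos (by omega : (0:Int) < kk) j).mp hj
    exact ⟨this.1, by omega⟩
  rw [pvIncPassA, pvFoldSet_get _ w hin i hi, pvCount_range n kk hkk i (by omega)]

-- the fold of increment passes over the chain computes the per-index divisor count
theorem pvFold_get (n : Int) (K : List Int) : ∀ (w : List Int), (∀ kk ∈ K, 1 ≤ kk) →
    ((w.length : Int) = n) → ∀ i : Nat, (i : Int) < n →
    PySem.List.pyGetD (K.foldl (fun w kk => pvIncPassA n kk w) w) (i : Int) 0
      = PySem.List.pyGetD w (i : Int) 0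
        + (K.countP (fun kk => PySem.Int.mod (i : Int) kk == 0) : Int) := by
  induction K with
  | nil => intro w _ _ i _; simp
  | cons kk t ih =>
    intro w hpos hlen i hi
    have hkk : 1 ≤ kk := hpos kk (List.mem_cons_self ..)
    have hlen' : ((pvIncPassA n kk w).length : Int) = n := by rw [pvIncPassA_len]; exact hlen
    rw [List.foldl_cons, ih (pvIncPassA n kk w) (fun x hx => hpos x (List.mem_cons_of_mem _ hx)) hlen' i hi]
    rw [pvIncPassA_get n kk w hkk hlen i (by omega)]
    have hmod : (PySem.Int.mod (i : Int) kk == 0) = (if kk ∣ (i : Int) then true else false) := by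
      by_cases hd : kk ∣ (i : Int)
      · simp [hd, (PySem.Int.mod_eq_zero_iff_dvd (i : Int) kk).mpr hd]
      · have : PySem.Int.mod (i : Int) kk ≠ 0 := fun h =>
          hd ((PySem.Int.mod_eq_zero_iff_dvd (i : Int) kk).mp h)
        simp [hd, this]
    rw [List.countP_cons, hmod]
    by_cases hd : kk ∣ (i : Int)
    · simp [hd]
      omega
    · simp [hd]

-- ===== VERDICT (by name: the statement is the Claim_ definition above) =====
theorem get_focus_weights_py_spec : Claim_equal_get_focus_weights_py := by
  unfold Claim_equal_get_focus_weights_py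
  intro n _
  unfold Spec_get_focus_weights_py
  unfold get_focus_weights_py get_focus_weights_py_alt
  have hinv0 : ∀ r : Int, 2 ≤ r → r < 2 → ¬ r ∣ n := by intro r h1 h2; omega
  rw [pvLoop_eq n.toNat n 2 (List.replicate n.toNat 0) n (le_refl 2) (by omega) hinv0]
  set K := pvChainB n.toNat n 2 with hK
  set w0 : List Int := List.replicate n.toNat 0 with hw0
  have hpos : ∀ kk ∈ K, 1 ≤ kk := pvChain_pos n.toNat n 2 (le_refl 2) (by omega) hinv0
  set W := K.foldl (fun w kk => pvIncPassA n kk w) w0 with hW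
  have hWlen : W.length = n.toNat := by
    rw [hW]
    have : ∀ (L : List Int) (w : List Int), (L.foldl (fun w kk => pvIncPassA n kk w) w).length = w.length := by
      intro L
      induction L with
      | nil => intro w; rfl
      | cons a t ih => intro w; rw [List.foldl_cons, ih, pvIncPassA_len]
    rw [this, hw0, List.length_replicate]
  by_cases hn : n ≤ 0
  · have h1 : W = [] := List.eq_nil_of_length_eq_zero (by omega)
    have h2 : PySem.List.pyRange 0 n 1 = [] := PySem.List.pyRange_one_eq_nil (by omega)
    rw [h1, h2, List.map_nil]
  · have hlenI : (W.length : Int) = n := by omega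
    have hlen0 : (w0.length : Int) = n := by rw [hw0, List.length_replicate]; omega
    conv_lhs => rw [show W = List.map (fun j => PySem.List.pyGetD W j 0)
      (PySem.List.pyRange 0 (PySem.List.len W) 1) from (PySem.List.map_pyGetD_pyRange_zero W 0).symm]
    have hlenW : PySem.List.len W = n := by rw [PySem.List.len_eq]; omega
    rw [hlenW]
    apply List.map_congr_left
    intro i hi
    have hi' := (PySem.List.mem_pyRange_iff_of_pos (by omega : (0:Int) < 1) i).mp hi
    have hieq : i = ((i.toNat : Nat) : Int) := by omega
    rw [hieq, pvFold_get n K w0 hpos hlen0 i.toNat (by omega)]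
    have hget0 : PySem.List.pyGetD w0 ((i.toNat : Nat) : Int) 0 = 0 := by
      rw [PySem.List.pyGetD_of_nonneg _ _ (by omega), hw0]
      simp
    rw [hget0, PySem.List.foldl_if_add_one (fun k => PySem.Int.mod ((i.toNat : Nat) : Int) k == 0) K 0]
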